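-- pv_equiv track=rewrite | github.com/pc5401/my_BOJ | 백준/Silver/7656. 만능 오라클/만능 오라클.py | solve
-- ===== SOURCE A (Python) =====
-- def solve(questions: str):
--     rtn = []
--     start = end = -1
--     while True:
--         start = questions.find('What is', end + 1)
--         if start == -1:
--             break
--         end = questions.find('?', start)
--         if end == -1:
--             break
--
--         if '.' in questions[start:end]:
--             end = questions.find('.', start)
--             continue
--
--         answer = 'Forty-two' + questions[start + 4:end] + '.'
--         rtn.append(answer)
--
--     return rtn
-- ===== SOURCE B (Python) =====
-- def solve(questions: str):
--     # One pass over '?'-terminated segments: in each segment, the only possible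
--     # match is the first 'What is' after the segment's last '.' (if any).
--     rtn = []
--     parts = questions.split('?')
--     for seg in parts[:-1]:
--         tail = seg[seg.rfind('.') + 1:]
--         i = tail.find('What is')
--         if i != -1:
--             rtn.append('Forty-two' + tail[i + 4:] + '.')
--     return rtn
-- ===== Notes on version B (the rewrite author's own statement) =====
-- stated objective: alternative
-- what changed: A walks the whole string with start/end cursors, repeatedly calling find for the search phrase, the question mark and the period and re-scanning each candidate substring; B instead splits the input once at question marks and, for each piece before a question mark, keeps only the text after that piece's last period and emits the answer for the first occurrence of the search phrase there, with no cursor state.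
import Mathlib
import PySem

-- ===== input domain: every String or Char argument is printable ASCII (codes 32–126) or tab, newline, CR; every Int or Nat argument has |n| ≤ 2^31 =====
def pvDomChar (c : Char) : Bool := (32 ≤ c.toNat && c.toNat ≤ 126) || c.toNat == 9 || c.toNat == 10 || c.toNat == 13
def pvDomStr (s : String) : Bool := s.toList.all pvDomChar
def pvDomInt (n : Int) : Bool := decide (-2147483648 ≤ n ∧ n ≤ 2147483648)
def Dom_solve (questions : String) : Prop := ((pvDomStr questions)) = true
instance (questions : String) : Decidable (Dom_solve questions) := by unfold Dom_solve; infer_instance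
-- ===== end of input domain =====

-- B replaces A's cursor-jumping find/while loop by one pass over the '?'-separated segments
-- (in each segment the only possible match is the first 'What is' after the segment's last '.'):
-- objective 'alternative' — a structurally different single-split algorithm of similar cost.


-- ===== PORT A =====
-- the search pattern 'What is' (shared literal)
def wChars : List Char := "What is".toList

-- A's while-loop; fuel (length+1 iterations always suffice) only makes the recursion structural
def solveLoop (q : List Char) (rtn : List String) (end_ : Int) : Nat → List String
  | 0 => rtn
  | fuel + 1 =>
    let start := PySem.Chars.findFrom q wChars (end_ + 1)
    if start = -1 then rtn
    else
      let end2 := PySem.Chars.findFrom q ['?'] start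
      if end2 = -1 then rtn
      else if PySem.Chars.isIn ['.'] (PySem.Chars.slice q (some start) (some end2)) then
        solveLoop q rtn (PySem.Chars.findFrom q ['.'] start) fuel
      else
        solveLoop q
          (rtn ++ [String.ofList ("Forty-two".toList ++ PySem.Chars.slice q (some (start + 4)) (some end2) ++ ['.'])])
          end2 fuel

def solve (questions : String) : List String :=
  solveLoop questions.toList [] (-1) (questions.toList.length + 1)

-- ===== PORT B =====
def solve_alt (questions : String) : List String :=
  (PySem.List.slice (PySem.Chars.splitOn questions.toList ['?']) none (some (-1))).foldl
    (fun rtn seg =>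
      let tail := PySem.Chars.slice seg (some (PySem.Chars.rfind seg ['.'] + 1)) none
      let i := PySem.Chars.find tail wChars
      if i ≠ -1 then
        rtn ++ [String.ofList ("Forty-two".toList ++ PySem.Chars.slice tail (some (i + 4)) none ++ ['.'])]
      else rtn) []

-- ===== PRECONDITION & SPEC =====
def Spec_solve (questions : String) (out : List String) : Prop := out = solve_alt questions
instance (questions : String) (out : List String) : Decidable (Spec_solve questions out) := by unfold Spec_solve; infer_instance

-- ===== CLAIM (what is proved, stated in full; the proofs are below) =====
def Claim_equal_solve : Prop := ∀ (questions : String), Dom_solve questions → Spec_solve questions (solve questions)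

-- ===== LEMMAS AND PROOFS =====

-- basic prefix/index facts specific to this task's single-char and 'What is' patterns
lemma single_prefix_getElem (c : Char) (t : List Char) : ([c] <+: t) ↔ t[0]? = some c := by
  constructor
  · rintro ⟨s, rfl⟩; simp
  · intro h; cases t with
    | nil => simp at h
    | cons a t => simp at h; subst h; exact ⟨t, rfl⟩

lemma single_prefix_drop (s : List Char) (m : Nat) (c : Char) :
    ([c] <+: s.drop m) ↔ s[m]? = some c := by
  rw [single_prefix_getElem]; simp [List.getElem?_drop]

-- 'What is' contains no '?', so a 'What is' prefix cannot cross a '?' boundary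
lemma w_nocross (x y : List Char) : (wChars <+: x ++ '?' :: y) ↔ wChars <+: x := by
  constructor
  · intro h
    by_cases hx : wChars.length ≤ x.length
    · have := List.prefix_iff_eq_take.mp h
      rw [List.take_append_of_le_length hx] at this
      rw [this]; exact List.take_prefix _ _
    · exfalso
      have hq : wChars[x.length]? = some '?' := by
        have := List.prefix_iff_eq_take.mp h
        conv_lhs => rw [this]
        rw [List.getElem?_take]
        rw [if_pos (by omega)]
        rw [List.getElem?_append_right le_rfl]
        simp
      have : '?' ∈ wChars := List.mem_of_getElem? hq
      revert this; decide
  · intro h; exact h.trans (List.prefix_append _ _)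

lemma prefix_extend (sub x z : List Char) (p : Nat) (hp : p ≤ x.length)
    (h : sub <+: x.drop p) : sub <+: (x ++ z).drop p := by
  rw [List.drop_append_of_le_length hp]
  exact h.trans (List.prefix_append _ _)

-- find points at the first occurrence: the converse direction of Chars.find_spec
lemma find_eq_coe (s sub : List Char) (n : Nat) (h1 : sub <+: s.drop n)
    (h2 : ∀ m, m < n → ¬ sub <+: s.drop m) : PySem.Chars.find s sub = (n : Int) := by
  have hin : PySem.Chars.isIn sub s = true :=
    (PySem.Chars.exists_prefix_drop_iff_isIn sub s).mp ⟨n, h1⟩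
  have hne : PySem.Chars.find s sub ≠ -1 := by
    rw [Ne, PySem.Chars.find_eq_neg_one_iff]
    exact fun hc => hc ((PySem.Chars.isIn_iff_infix sub s).mp hin)
  have hge : 0 ≤ PySem.Chars.find s sub := by
    have := PySem.Chars.neg_one_le_find s sub; omega
  obtain ⟨hpre, hmin⟩ := PySem.Chars.find_spec hge
  have : (PySem.Chars.find s sub).toNat = n := by
    rcases Nat.lt_trichotomy (PySem.Chars.find s sub).toNat n with h | h | h
    · exact absurd hpre (h2 _ h)
    · exact h
    · exact absurd h1 (hmin n h)
  omega

lemma find_eq_neg_of (s sub : List Char) (h : ∀ m : Nat, ¬ sub <+: s.drop m) :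
    PySem.Chars.find s sub = -1 := by
  rw [PySem.Chars.find_eq_neg_one_iff]
  intro hc
  have := (PySem.Chars.exists_prefix_drop_iff_isIn sub s).mpr
  rw [PySem.Chars.isIn_iff_infix] at this
  obtain ⟨j, hj⟩ := (PySem.Chars.exists_prefix_drop_iff_isIn sub s).mpr
    ((PySem.Chars.isIn_iff_infix sub s).mpr hc)
  exact h j hj

-- rfind on a single-char needle: either absent, or the last occurrence
lemma rfind_single_spec (s : List Char) (c : Char) :
    (PySem.Chars.rfind s [c] = -1 ∧ ∀ m : Nat, s[m]? ≠ some c) ∨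
    (∃ n : Nat, PySem.Chars.rfind s [c] = (n : Int) ∧ s[n]? = some c ∧
      ∀ m : Nat, n < m → s[m]? ≠ some c) := by
  have hpre : ∀ m : Nat, [c].isPrefixOf (s.drop m) = true ↔ s[m]? = some c := by
    intro m; rw [List.isPrefixOf_iff_prefix, single_prefix_drop]
  have aux : ∀ j : Nat, (∀ m : Nat, j < m → s[m]? ≠ some c) →
      (PySem.Chars.rfind.go s [c] j = -1 ∧ ∀ m : Nat, s[m]? ≠ some c) ∨
      (∃ n : Nat, PySem.Chars.rfind.go s [c] j = (n : Int) ∧ s[n]? = some c ∧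
        ∀ m : Nat, n < m → s[m]? ≠ some c) := by
    intro j
    induction j with
    | zero =>
      intro hj
      by_cases h0 : s[0]? = some c
      · right
        refine ⟨0, ?_, h0, hj⟩
        rw [show PySem.Chars.rfind.go s [c] 0 =
          if [c].isPrefixOf s = true then 0 else -1 from rfl]
        rw [if_pos (by simpa using (hpre 0).mpr h0)]; simp
      · left
        refine ⟨?_, fun m => ?_⟩
        · rw [show PySem.Chars.rfind.go s [c] 0 =
            if [c].isPrefixOf s = true then 0 else -1 from rfl]
          rw [if_neg (by rw [show s = s.drop 0 from rfl, hpre 0]; simpa using h0)]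
        · rcases Nat.eq_zero_or_pos m with rfl | hm
          · exact h0
          · exact hj m hm
    | succ j ih =>
      intro hj
      by_cases hsj : s[j+1]? = some c
      · right
        refine ⟨j + 1, ?_, hsj, hj⟩
        rw [show PySem.Chars.rfind.go s [c] (j+1) =
          if [c].isPrefixOf (s.drop (j+1)) = true then ((j+1 : Nat) : Int)
          else PySem.Chars.rfind.go s [c] j from rfl]
        rw [if_pos ((hpre (j+1)).mpr hsj)]
      · have hgo : PySem.Chars.rfind.go s [c] (j+1) = PySem.Chars.rfind.go s [c] j := by
          rw [show PySem.Chars.rfind.go s [c] (j+1) =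
            if [c].isPrefixOf (s.drop (j+1)) = true then ((j+1 : Nat) : Int)
            else PySem.Chars.rfind.go s [c] j from rfl]
          rw [if_neg (by rw [hpre (j+1)]; exact hsj)]
        have ih' := ih (fun m hm => by
          rcases Nat.lt_or_ge (j+1) m with h | h
          · exact hj m h
          · have : m = j + 1 := by omega
            subst this; exact hsj)
        rcases ih' with ⟨h1, h2⟩ | ⟨n, e, hc2, hafter⟩
        · exact Or.inl ⟨hgo ▸ h1, h2⟩
        · exact Or.inr ⟨n, hgo ▸ e, hc2, hafter⟩
  have h := aux s.length (fun m hm => by rw [List.getElem?_eq_none (by omega)]; simp)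
  rw [show PySem.Chars.rfind s [c] = PySem.Chars.rfind.go s [c] s.length from rfl]
  exact h

-- splitOn '?' : the three structural facts the segment induction uses
lemma sgo_zero (l cur : List Char) (acc : List (List Char)) :
    PySem.Chars.splitOn.go ['?'] 0 l cur acc = ((cur.reverse ++ l) :: acc).reverse := rfl

lemma sgo_nil (fuel : Nat) (cur : List Char) (acc : List (List Char)) :
    PySem.Chars.splitOn.go ['?'] (fuel + 1) [] cur acc = (cur.reverse :: acc).reverse := rfl

lemma sgo_cons (fuel : Nat) (c : Char) (rest cur : List Char) (acc : List (List Char)) :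
    PySem.Chars.splitOn.go ['?'] (fuel + 1) (c :: rest) cur acc =
      if c = '?' then PySem.Chars.splitOn.go ['?'] fuel rest [] (cur.reverse :: acc)
      else PySem.Chars.splitOn.go ['?'] fuel rest (c :: cur) acc := by
  rw [show PySem.Chars.splitOn.go ['?'] (fuel + 1) (c :: rest) cur acc =
    if ['?'].isPrefixOf (c :: rest) = true then
      PySem.Chars.splitOn.go ['?'] fuel ((c :: rest).drop 1) [] (cur.reverse :: acc)
    else PySem.Chars.splitOn.go ['?'] fuel rest (c :: cur) acc from rfl]
  by_cases h : c = '?'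
  · subst h
    have hp : ['?'].isPrefixOf ('?' :: rest) = true := by simp [List.isPrefixOf]
    rw [if_pos hp, if_pos rfl]; rfl
  · have hp : ¬ (['?'].isPrefixOf (c :: rest) = true) := by
      simp [List.isPrefixOf]; exact Ne.symm h
    rw [if_neg hp, if_neg h]

lemma splitOn_go_acc (fuel : Nat) (l cur : List Char) (acc : List (List Char)) :
    PySem.Chars.splitOn.go ['?'] fuel l cur acc =
      acc.reverse ++ PySem.Chars.splitOn.go ['?'] fuel l cur [] := by
  induction fuel generalizing l cur acc with
  | zero => simp [sgo_zero]
  | succ f ih =>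
    cases l with
    | nil => simp [sgo_nil]
    | cons c rest =>
      rw [sgo_cons, sgo_cons]
      split_ifs with h
      · rw [ih rest [] (cur.reverse :: acc), ih rest [] [cur.reverse]]
        simp
      · rw [ih rest (c :: cur) acc]

lemma splitOn_go_nil (fuel : Nat) (cur : List Char) (acc : List (List Char)) :
    PySem.Chars.splitOn.go ['?'] fuel [] cur acc = (cur.reverse :: acc).reverse := by
  cases fuel with
  | zero => simp [sgo_zero]
  | succ f => exact sgo_nil f cur acc

lemma splitOn_go_seg (seg : List Char) (hs : '?' ∉ seg) :
    ∀ (l cur : List Char) (acc : List (List Char)) (fuel : Nat),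
      seg.length + l.length + 1 ≤ fuel →
      PySem.Chars.splitOn.go ['?'] fuel (seg ++ l) cur acc =
        PySem.Chars.splitOn.go ['?'] (fuel - seg.length) l (seg.reverse ++ cur) acc := by
  induction seg with
  | nil => intro l cur acc fuel _; simp
  | cons c seg' ih =>
    intro l cur acc fuel hf
    have hc : c ≠ '?' := fun hc => hs (hc ▸ List.mem_cons_self)
    have hs' : '?' ∉ seg' := fun hm => hs (List.mem_cons_of_mem _ hm)
    cases fuel with
    | zero => simp at hf
    | succ f =>
      rw [show (c :: seg') ++ l = c :: (seg' ++ l) from rfl, sgo_cons, if_neg hc]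
      rw [ih hs' l (c :: cur) acc f (by simp at hf ⊢; omega)]
      simp

lemma splitOn_no_q (r : List Char) (h : '?' ∉ r) : PySem.Chars.splitOn r ['?'] = [r] := by
  rw [show PySem.Chars.splitOn r ['?'] =
    PySem.Chars.splitOn.go ['?'] (r.length + 1) r [] [] from rfl]
  have hseg := splitOn_go_seg r h [] [] [] (r.length + 1) (by simp)
  rw [List.append_nil] at hseg
  rw [hseg]
  have h1 : r.length + 1 - r.length = 1 := by omega
  rw [h1, splitOn_go_nil]
  simp

lemma splitOn_cons (seg rest : List Char) (h : '?' ∉ seg) :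
    PySem.Chars.splitOn (seg ++ '?' :: rest) ['?'] = seg :: PySem.Chars.splitOn rest ['?'] := by
  rw [show PySem.Chars.splitOn (seg ++ '?' :: rest) ['?'] =
    PySem.Chars.splitOn.go ['?'] ((seg ++ '?' :: rest).length + 1) (seg ++ '?' :: rest) [] []
    from rfl]
  rw [splitOn_go_seg seg h ('?' :: rest) [] [] _ (by simp)]
  have h1 : (seg ++ '?' :: rest).length + 1 - seg.length = rest.length + 1 + 1 := by
    simp; omega
  rw [h1, sgo_cons, if_pos rfl, splitOn_go_acc]
  simp
  rfl

lemma splitOn_ne_nil (r : List Char) : PySem.Chars.splitOn r ['?'] ≠ [] := by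
  have aux : ∀ (fuel : Nat) (l cur : List Char) (acc : List (List Char)),
      PySem.Chars.splitOn.go ['?'] fuel l cur acc ≠ [] := by
    intro fuel
    induction fuel with
    | zero => intro l cur acc; simp [sgo_zero]
    | succ f ih =>
      intro l cur acc
      cases l with
      | nil => simp [sgo_nil]
      | cons c rest =>
        rw [sgo_cons]
        split_ifs <;> exact ih _ _ _
  exact aux _ _ _ _

lemma exists_split (r : List Char) (h : '?' ∈ r) :
    ∃ seg rest : List Char, r = seg ++ '?' :: rest ∧ '?' ∉ seg := by
  induction r with
  | nil => simp at h
  | cons c t ih =>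
    by_cases hc : c = '?'
    · exact ⟨[], t, by simp [hc], by simp⟩
    · have ht : '?' ∈ t := by
        rcases List.mem_cons.mp h with h1 | h1
        · exact absurd h1.symm hc
        · exact h1
      obtain ⟨s, rest, rfl, hs⟩ := ih ht
      exact ⟨c :: s, rest, rfl, by simp [hs]; exact fun hh => hc hh.symm⟩

-- reference function: A's loop rephrased on the current suffix (proof tool only)
def gref (r : List Char) : List String :=
  if hi : PySem.Chars.find r wChars = -1 then []
  else
    if hj : PySem.Chars.find (r.drop (PySem.Chars.find r wChars).toNat) ['?'] = -1 then []
    else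
      if PySem.Chars.isIn ['.']
          ((r.drop (PySem.Chars.find r wChars).toNat).take
            (PySem.Chars.find (r.drop (PySem.Chars.find r wChars).toNat) ['?']).toNat) = true then
        gref ((r.drop (PySem.Chars.find r wChars).toNat).drop
          ((PySem.Chars.find (r.drop (PySem.Chars.find r wChars).toNat) ['.']).toNat + 1))
      else
        String.ofList ("Forty-two".toList ++
          ((r.drop (PySem.Chars.find r wChars).toNat).drop 4).take
            ((PySem.Chars.find (r.drop (PySem.Chars.find r wChars).toNat) ['?']).toNat - 4) ++ ['.']) ::
          gref ((r.drop (PySem.Chars.find r wChars).toNat).drop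
            ((PySem.Chars.find (r.drop (PySem.Chars.find r wChars).toNat) ['?']).toNat + 1))
termination_by r.length
decreasing_by
  all_goals
    have hinf := (PySem.Chars.find_ne_neg_one_iff r wChars).mp hi
    have hlen := hinf.length_le
    have hw : wChars.length = 7 := by decide
    simp only [List.length_drop]
    omega

-- B's per-segment contribution (emitCore gets the already-cut tail)
def emitCore (tail : List Char) : List String :=
  let i := PySem.Chars.find tail wChars
  if i ≠ -1 then
    [String.ofList ("Forty-two".toList ++ PySem.Chars.slice tail (some (i + 4)) none ++ ['.'])]
  else []

def emitSeg (seg : List Char) : List String :=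
  emitCore (PySem.Chars.slice seg (some (PySem.Chars.rfind seg ['.'] + 1)) none)

lemma emitSeg_eq_drop (seg : List Char) :
    emitSeg seg = emitCore (seg.drop (PySem.Chars.rfind seg ['.'] + 1).toNat) := by
  have h : 0 ≤ PySem.Chars.rfind seg ['.'] + 1 := by
    rcases rfind_single_spec seg '.' with ⟨h1, _⟩ | ⟨n, h1, _, _⟩ <;> rw [h1] <;> omega
  unfold emitSeg
  rw [show PySem.Chars.slice seg (some (PySem.Chars.rfind seg ['.'] + 1)) none =
    PySem.List.slice seg (some (PySem.Chars.rfind seg ['.'] + 1)) none from by simp]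
  rw [PySem.List.slice_from seg h]

lemma gref_of_no_w (r : List Char) (h : ¬ wChars <:+: r) : gref r = [] := by
  rw [gref]
  have hf : PySem.Chars.find r wChars = -1 := (PySem.Chars.find_eq_neg_one_iff r wChars).mpr h
  simp [hf]

lemma gref_of_no_q (r : List Char) (h : '?' ∉ r) : gref r = [] := by
  rw [gref]
  by_cases hw : PySem.Chars.find r wChars = -1
  · simp [hw]
  · have hq : PySem.Chars.find (r.drop (PySem.Chars.find r wChars).toNat) ['?'] = -1 := by
      apply find_eq_neg_of
      intro m hm
      rw [single_prefix_drop] at hm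
      rw [List.getElem?_drop] at hm
      exact h (List.mem_of_getElem? hm)
    simp [hw, hq]

lemma tail_drop_eq (seg : List Char) (a : Nat) (ha : seg[a]? = some '.') :
    seg.drop (PySem.Chars.rfind seg ['.'] + 1).toNat =
      (seg.drop (a + 1)).drop (PySem.Chars.rfind (seg.drop (a + 1)) ['.'] + 1).toNat := by
  rcases rfind_single_spec seg '.' with ⟨_, h2⟩ | ⟨D, hD, hDc, hafter⟩
  · exact absurd ha (h2 a)
  · have haD : a ≤ D := by
      by_contra hlt
      exact (hafter a (by omega)) ha
    rcases rfind_single_spec (seg.drop (a + 1)) '.' with ⟨hD2, h2'⟩ | ⟨n₂, hD2, hc2, hafter2⟩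
    · -- no dot after position a: so D = a
      have hDa : D = a := by
        by_contra hne
        have hDa1 : a + 1 ≤ D := by omega
        have : (seg.drop (a + 1))[D - (a + 1)]? = some '.' := by
          rw [List.getElem?_drop]; rw [show a + 1 + (D - (a + 1)) = D from by omega]; exact hDc
        exact (h2' (D - (a + 1))) this
      rw [hD, hD2, hDa]
      simp [List.drop_drop]
    · -- last dot of seg.drop (a+1) is at n₂; show D = a + 1 + n₂
      have h1 : seg[a + 1 + n₂]? = some '.' := by
        rw [← List.getElem?_drop]; exact hc2
      have hle : a + 1 + n₂ ≤ D := by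
        by_contra hlt
        exact (hafter (a + 1 + n₂) (by omega)) h1
      have hge : D ≤ a + 1 + n₂ := by
        by_contra hlt
        have hD1 : a + 1 ≤ D := by omega
        have : (seg.drop (a + 1))[D - (a + 1)]? = some '.' := by
          rw [List.getElem?_drop]; rw [show a + 1 + (D - (a + 1)) = D from by omega]; exact hDc
        exact (hafter2 (D - (a + 1)) (by omega)) this
      rw [hD, hD2]
      rw [List.drop_drop]
      congr 1
      omega

lemma emit_of_first (seg : List Char) (iN : Nat) (hW : wChars <+: seg.drop iN)
    (hmin : ∀ p, p < iN → ¬ wChars <+: seg.drop p)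
    (hnodot : ∀ p : Nat, iN ≤ p → seg[p]? ≠ some '.') :
    emitSeg seg = [String.ofList ("Forty-two".toList ++ seg.drop (iN + 4) ++ ['.'])] := by
  rw [emitSeg_eq_drop]
  set m := (PySem.Chars.rfind seg ['.'] + 1).toNat with hm
  have hmle : m ≤ iN := by
    rcases rfind_single_spec seg '.' with ⟨h1, _⟩ | ⟨n, h1, hc, _⟩
    · rw [h1] at hm; simp [hm]
    · rw [h1] at hm
      have : n < iN := by
        by_contra hge
        exact (hnodot n (by omega)) hc
      simp [hm]; omega
  have hfind : PySem.Chars.find (seg.drop m) wChars = ((iN - m : Nat) : Int) := by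
    apply find_eq_coe
    · rw [List.drop_drop, show m + (iN - m) = iN from by omega]; exact hW
    · intro p hp
      rw [List.drop_drop]
      exact hmin (m + p) (by omega)
  unfold emitCore
  rw [hfind]
  rw [if_pos (show ¬ (((iN - m : Nat) : Int) = -1) by omega)]
  have hslice : PySem.Chars.slice (seg.drop m) (some (((iN - m : Nat) : Int) + 4)) none =
      seg.drop (iN + 4) := by
    rw [show ((iN - m : Nat) : Int) + 4 = ((iN - m + 4 : Nat) : Int) from by push_cast; ring]
    rw [show PySem.Chars.slice (seg.drop m) (some ((iN - m + 4 : Nat) : Int)) none =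
      PySem.List.slice (seg.drop m) (some ((iN - m + 4 : Nat) : Int)) none from by simp]
    rw [PySem.List.slice_from _ (by positivity), Int.toNat_natCast, List.drop_drop]
    congr 1
    omega
  rw [hslice]

lemma emit_none (seg : List Char) (hno : ∀ p : Nat, ¬ wChars <+: seg.drop p) :
    emitSeg seg = [] := by
  rw [emitSeg_eq_drop]
  unfold emitCore
  have hfind : PySem.Chars.find (seg.drop (PySem.Chars.rfind seg ['.'] + 1).toNat) wChars = -1 := by
    apply find_eq_neg_of
    intro p
    rw [List.drop_drop]
    exact hno _
  rw [hfind]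
  simp

-- the heart: one '?'-terminated segment contributes exactly emitSeg seg
lemma seg_step (n : Nat) : ∀ seg rest : List Char, seg.length ≤ n → '?' ∉ seg →
    gref (seg ++ '?' :: rest) = emitSeg seg ++ gref rest := by
  induction n using Nat.strong_induction_on with
  | _ n ih =>
  intro seg rest hlen hs
  have hw7 : wChars.length = 7 := by decide
  by_cases hw : PySem.Chars.find (seg ++ '?' :: rest) wChars = -1
  · -- no 'What is' anywhere
    rw [gref_of_no_w _ ((PySem.Chars.find_eq_neg_one_iff _ wChars).mp hw)]
    have hnoW : ∀ p : Nat, ¬ wChars <+: seg.drop p := by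
      intro p hp
      by_cases hple : p ≤ seg.length
      · have hinf : wChars <:+: seg ++ '?' :: rest :=
          (PySem.Chars.isIn_iff_infix _ _).mp
            ((PySem.Chars.exists_prefix_drop_iff_isIn _ _).mp
              ⟨p, prefix_extend wChars seg ('?' :: rest) p hple hp⟩)
        rw [PySem.Chars.find_eq_neg_one_iff] at hw
        exact hw hinf
      · rw [List.drop_eq_nil_of_le (by omega)] at hp
        have := hp.length_le
        simp [hw7] at this
    rw [emit_none seg hnoW]
    rw [gref_of_no_w rest (fun hinf => by
      rw [PySem.Chars.find_eq_neg_one_iff] at hw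
      exact hw (hinf.trans ⟨seg ++ ['?'], [], by simp⟩))]
    simp
  · have hi0 : 0 ≤ PySem.Chars.find (seg ++ '?' :: rest) wChars := by
      have := PySem.Chars.neg_one_le_find (seg ++ '?' :: rest) wChars; omega
    obtain ⟨hpre, hmin⟩ := PySem.Chars.find_spec hi0
    set iN := (PySem.Chars.find (seg ++ '?' :: rest) wChars).toNat with hiN
    by_cases hseg : iN ≤ seg.length
    · -- the first 'What is' is inside seg
      have hdropr : (seg ++ '?' :: rest).drop iN = seg.drop iN ++ '?' :: rest :=
        List.drop_append_of_le_length hseg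
      have hWseg : wChars <+: seg.drop iN := (w_nocross _ _).mp (hdropr ▸ hpre)
      have hlen7 : iN + 7 ≤ seg.length := by
        have := hWseg.length_le
        simp [hw7] at this
        omega
      have hj : PySem.Chars.find ((seg ++ '?' :: rest).drop iN) ['?'] =
          ((seg.length - iN : Nat) : Int) := by
        apply find_eq_coe
        · rw [hdropr, show seg.length - iN = (seg.drop iN).length from by simp, List.drop_left]
          exact ⟨rest, rfl⟩
        · intro m hm
          rw [single_prefix_drop, List.getElem?_drop]
          rw [List.getElem?_append_left (show iN + m < seg.length by omega)]
          intro hq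
          exact hs (List.mem_of_getElem? hq)
      have hjN : (PySem.Chars.find ((seg ++ '?' :: rest).drop iN) ['?']).toNat = seg.length - iN := by
        rw [hj, Int.toNat_natCast]
      have hjne : ¬ PySem.Chars.find ((seg ++ '?' :: rest).drop iN) ['?'] = -1 := by
        rw [hj]; omega
      have htake : ((seg ++ '?' :: rest).drop iN).take (seg.length - iN) = seg.drop iN := by
        rw [hdropr, show seg.length - iN = (seg.drop iN).length from by simp, List.take_left]
      rw [gref, dif_neg hw, ← hiN, dif_neg hjne]
      by_cases hdot : '.' ∈ seg.drop iN
      · -- a '.' before the '?': A skips to just past the first '.', B's tail does too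
        have hd0 : 0 ≤ PySem.Chars.find ((seg ++ '?' :: rest).drop iN) ['.'] := by
          rw [PySem.Chars.find_nonneg_iff]
          have hinfty : List.drop iN seg <:+: List.drop iN (seg ++ '?' :: rest) :=
            ⟨[], '?' :: rest, by rw [hdropr]; simp⟩
          exact ((List.singleton_infix_iff _ _).mpr hdot).trans hinfty
        obtain ⟨hdpre, hdmin⟩ := PySem.Chars.find_spec hd0
        set dN := (PySem.Chars.find ((seg ++ '?' :: rest).drop iN) ['.']).toNat with hdN
        obtain ⟨pd, hpd⟩ := List.mem_iff_getElem?.mp hdot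
        have hpdlen : pd < seg.length - iN := by
          obtain ⟨hlt, _⟩ := List.getElem?_eq_some_iff.mp hpd
          simp at hlt; omega
        have hdlt : dN < seg.length - iN := by
          by_contra hge
          refine hdmin pd (by omega) ?_
          rw [single_prefix_drop, List.getElem?_drop,
            List.getElem?_append_left (show iN + pd < seg.length by omega)]
          rw [← List.getElem?_drop]
          exact hpd
        have hcond : PySem.Chars.isIn ['.'] (((seg ++ '?' :: rest).drop iN).take
            (PySem.Chars.find ((seg ++ '?' :: rest).drop iN) ['?']).toNat) = true := by
          rw [hjN, htake, PySem.Chars.isIn_iff_infix]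
          exact (List.singleton_infix_iff _ _).mpr hdot
        rw [if_pos hcond]
        have hadot : seg[iN + dN]? = some '.' := by
          have h := hdpre
          rw [single_prefix_drop, List.getElem?_drop,
            List.getElem?_append_left (show iN + dN < seg.length by omega)] at h
          exact h
        have hrdd : ((seg ++ '?' :: rest).drop iN).drop (dN + 1) =
            seg.drop (iN + (dN + 1)) ++ '?' :: rest := by
          rw [List.drop_drop]
          exact List.drop_append_of_le_length (by omega)
        rw [hrdd]
        have hlen2 : (seg.drop (iN + (dN + 1))).length < n := by simp; omega
        rw [ih (seg.drop (iN + (dN + 1))).length hlen2 _ rest le_rfl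
          (fun hm => hs (List.mem_of_mem_drop hm))]
        have htl := tail_drop_eq seg (iN + dN) hadot
        rw [show iN + dN + 1 = iN + (dN + 1) from by omega] at htl
        rw [emitSeg_eq_drop seg, emitSeg_eq_drop (seg.drop (iN + (dN + 1))), htl]
      · have hcond : ¬ (PySem.Chars.isIn ['.'] (((seg ++ '?' :: rest).drop iN).take
            (PySem.Chars.find ((seg ++ '?' :: rest).drop iN) ['?']).toNat) = true) := by
          rw [hjN, htake, PySem.Chars.isIn_iff_infix, List.singleton_infix_iff]
          exact hdot
        rw [if_neg hcond, hjN]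
        have hrest : ((seg ++ '?' :: rest).drop iN).drop (seg.length - iN + 1) = rest := by
          rw [hdropr, show seg.length - iN + 1 = (seg.drop iN).length + 1 from by simp]
          rw [List.drop_length_add_append]
          simp
        have hans : (((seg ++ '?' :: rest).drop iN).drop 4).take (seg.length - iN - 4) =
            seg.drop (iN + 4) := by
          rw [List.drop_drop]
          rw [List.drop_append_of_le_length (show iN + 4 ≤ seg.length by omega)]
          rw [show seg.length - iN - 4 = (seg.drop (iN + 4)).length from by simp; omega]
          exact List.take_left
        rw [hrest, hans]
        have hminseg : ∀ p, p < iN → ¬ wChars <+: seg.drop p := fun p hp hpre' =>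
          hmin p hp (prefix_extend wChars seg ('?' :: rest) p (by omega) hpre')
        have hnodot : ∀ p : Nat, iN ≤ p → seg[p]? ≠ some '.' := by
          intro p hp hc
          apply hdot
          rw [List.mem_iff_getElem?]
          exact ⟨p - iN, by rw [List.getElem?_drop, show iN + (p - iN) = p from by omega]; exact hc⟩
        rw [emit_of_first seg iN hWseg hminseg hnodot]
        simp
    · -- the first 'What is' lies beyond the '?': seg contributes nothing and
      -- gref continues exactly as gref rest
      have hiN1 : seg.length + 1 ≤ iN := by omega
      have hiNlen : iN ≤ (seg ++ '?' :: rest).length := by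
        have h := PySem.Chars.find_le_length (seg ++ '?' :: rest) wChars
        simp only [hiN]
        omega
      have hreq : (seg ++ '?' :: rest).drop iN = rest.drop (iN - (seg.length + 1)) := by
        calc (seg ++ '?' :: rest).drop iN
            = ((seg ++ ['?']) ++ rest).drop ((seg ++ ['?']).length + (iN - (seg.length + 1))) := by
              congr 1
              · simp; omega
              · simp
          _ = rest.drop (iN - (seg.length + 1)) := List.drop_length_add_append _
      have hfr : PySem.Chars.find rest wChars = ((iN - (seg.length + 1) : Nat) : Int) := by
        apply find_eq_coe
        · rw [← hreq]; exact hpre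
        · intro m hm hp
          apply hmin (seg.length + 1 + m) (by omega)
          have he : (seg ++ '?' :: rest).drop (seg.length + 1 + m) = rest.drop m := by
            rw [show seg ++ '?' :: rest = (seg ++ ['?']) ++ rest from by simp,
              show seg.length + 1 + m = (seg ++ ['?']).length + m from by simp]
            exact List.drop_length_add_append _
          rw [he]; exact hp
      have hnoWseg : ∀ p : Nat, ¬ wChars <+: seg.drop p := by
        intro p hp
        by_cases hple : p ≤ seg.length
        · exact hmin p (by omega) (prefix_extend wChars seg ('?' :: rest) p hple hp)
        · rw [List.drop_eq_nil_of_le (by omega)] at hp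
          have := hp.length_le
          simp [hw7] at this
      rw [emit_none seg hnoWseg]
      simp only [List.nil_append]
      have hfrne : ¬ PySem.Chars.find rest wChars = -1 := by rw [hfr]; omega
      have hdropeq : (seg ++ '?' :: rest).drop iN =
          rest.drop (PySem.Chars.find rest wChars).toNat := by
        rw [hfr, Int.toNat_natCast]; exact hreq
      conv_lhs => rw [gref]
      conv_rhs => rw [gref]
      rw [dif_neg hw, dif_neg hfrne, ← hiN, hdropeq]

lemma g2b (n : Nat) : ∀ r : List Char, r.length ≤ n →
    gref r = ((PySem.Chars.splitOn r ['?']).dropLast).flatMap emitSeg := by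
  induction n using Nat.strong_induction_on with
  | _ n ih =>
  intro r hlen
  by_cases hq : '?' ∈ r
  · obtain ⟨seg, rest, rfl, hs⟩ := exists_split r hq
    rw [splitOn_cons seg rest hs, List.dropLast_cons_of_ne_nil (splitOn_ne_nil rest),
      List.flatMap_cons]
    rw [seg_step seg.length seg rest le_rfl hs]
    congr 1
    have hr : rest.length < n := by
      have : (seg ++ '?' :: rest).length = seg.length + 1 + rest.length := by simp; omega
      omega
    exact ih rest.length hr rest le_rfl
  · rw [gref_of_no_q r hq, splitOn_no_q r hq]
    simp

-- A's loop from absolute search position k computes gref of the suffix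
lemma a2g (fuel : Nat) : ∀ (q : List Char) (rtn : List String) (k : Nat),
    k ≤ q.length → q.length - k < fuel →
    solveLoop q rtn ((k : Int) - 1) fuel = rtn ++ gref (q.drop k) := by
  induction fuel with
  | zero => intro q rtn k h1 h2; omega
  | succ f ihf =>
  intro q rtn k hk hf
  rw [solveLoop]
  rw [show ((k : Int) - 1 + 1) = (k : Int) from by ring]
  rw [PySem.Chars.findFrom_natCast q wChars k hk]
  by_cases hfw : PySem.Chars.find (q.drop k) wChars = -1
  · rw [if_pos hfw, if_pos rfl]
    rw [gref_of_no_w _ ((PySem.Chars.find_eq_neg_one_iff _ wChars).mp hfw)]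
    simp
  · rw [if_neg hfw]
    have hi0 : 0 ≤ PySem.Chars.find (q.drop k) wChars := by
      have := PySem.Chars.neg_one_le_find (q.drop k) wChars; omega
    set iN := (PySem.Chars.find (q.drop k) wChars).toNat with hiN
    have hiZ : PySem.Chars.find (q.drop k) wChars = (iN : Int) := by rw [hiN]; omega
    have hki : (k : Int) + PySem.Chars.find (q.drop k) wChars = ((k + iN : Nat) : Int) := by
      rw [hiZ]; push_cast; ring
    rw [hki]
    rw [if_neg (show ¬ ((k + iN : Nat) : Int) = -1 by omega)]
    have hiNle : k + iN ≤ q.length := by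
      have h2 := PySem.Chars.find_le_length (q.drop k) wChars
      rw [hiZ] at h2
      simp at h2
      omega
    rw [PySem.Chars.findFrom_natCast q ['?'] (k + iN) hiNle]
    have hdd : (q.drop k).drop iN = q.drop (k + iN) := List.drop_drop
    by_cases hq7 : PySem.Chars.find (q.drop (k + iN)) ['?'] = -1
    · rw [if_pos hq7, if_pos rfl]
      rw [gref, dif_neg hfw, ← hiN, hdd, dif_pos hq7]
      simp
    · rw [if_neg hq7]
      have hj0 : 0 ≤ PySem.Chars.find (q.drop (k + iN)) ['?'] := by
        have := PySem.Chars.neg_one_le_find (q.drop (k + iN)) ['?']; omega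
      set jN := (PySem.Chars.find (q.drop (k + iN)) ['?']).toNat with hjN
      have hjZ : PySem.Chars.find (q.drop (k + iN)) ['?'] = (jN : Int) := by rw [hjN]; omega
      have hkj : ((k + iN : Nat) : Int) + PySem.Chars.find (q.drop (k + iN)) ['?'] =
          ((k + iN + jN : Nat) : Int) := by rw [hjZ]; push_cast; ring
      rw [hkj]
      rw [if_neg (show ¬ ((k + iN + jN : Nat) : Int) = -1 by omega)]
      obtain ⟨hjpre, _⟩ := PySem.Chars.find_spec hj0
      rw [← hjN] at hjpre
      have hjlt : jN < q.length - (k + iN) := by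
        by_contra hge
        rw [List.drop_eq_nil_of_le (by simp; omega)] at hjpre
        have := hjpre.length_le; simp at this
      have hsl : PySem.Chars.slice q (some ((k + iN : Nat) : Int))
          (some ((k + iN + jN : Nat) : Int)) = (q.drop (k + iN)).take jN := by
        rw [show PySem.Chars.slice q (some ((k + iN : Nat) : Int))
            (some ((k + iN + jN : Nat) : Int)) =
          PySem.List.slice q (some ((k + iN : Nat) : Int))
            (some ((k + iN + jN : Nat) : Int)) from by simp]
        rw [PySem.List.slice_natCast]
        congr 1
        omega
      rw [hsl]
      rw [gref, dif_neg hfw, ← hiN, hdd, dif_neg hq7, ← hjN]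
      by_cases hc : PySem.Chars.isIn ['.'] ((q.drop (k + iN)).take jN) = true
      · rw [if_pos hc, if_pos hc]
        have hdin : '.' ∈ q.drop (k + iN) := by
          rw [PySem.Chars.isIn_iff_infix, List.singleton_infix_iff] at hc
          exact List.mem_of_mem_take hc
        have hd0 : 0 ≤ PySem.Chars.find (q.drop (k + iN)) ['.'] := by
          rw [PySem.Chars.find_nonneg_iff, List.singleton_infix_iff]
          exact hdin
        have hdne : ¬ PySem.Chars.find (q.drop (k + iN)) ['.'] = -1 := by omega
        set dN := (PySem.Chars.find (q.drop (k + iN)) ['.']).toNat with hdN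
        have hdZ : PySem.Chars.find (q.drop (k + iN)) ['.'] = (dN : Int) := by rw [hdN]; omega
        obtain ⟨hdpre, _⟩ := PySem.Chars.find_spec hd0
        rw [← hdN] at hdpre
        have hdlt : dN < q.length - (k + iN) := by
          by_contra hge
          rw [List.drop_eq_nil_of_le (by simp; omega)] at hdpre
          have := hdpre.length_le; simp at this
        rw [PySem.Chars.findFrom_natCast q ['.'] (k + iN) hiNle, if_neg hdne]
        have hkd : ((k + iN : Nat) : Int) + PySem.Chars.find (q.drop (k + iN)) ['.'] =
            ((k + iN + dN + 1 : Nat) : Int) - 1 := by rw [hdZ]; push_cast; ring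
        rw [hkd]
        rw [ihf q rtn (k + iN + dN + 1) (by omega) (by omega)]
        rw [List.drop_drop, show k + iN + (dN + 1) = k + iN + dN + 1 from by omega]
      · rw [if_neg hc, if_neg hc]
        have hans : PySem.Chars.slice q (some (((k + iN : Nat) : Int) + 4))
            (some ((k + iN + jN : Nat) : Int)) = ((q.drop (k + iN)).drop 4).take (jN - 4) := by
          rw [show ((k + iN : Nat) : Int) + 4 = ((k + iN + 4 : Nat) : Int) from by push_cast; ring]
          rw [show PySem.Chars.slice q (some ((k + iN + 4 : Nat) : Int))
              (some ((k + iN + jN : Nat) : Int)) =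
            PySem.List.slice q (some ((k + iN + 4 : Nat) : Int))
              (some ((k + iN + jN : Nat) : Int)) from by simp]
          rw [PySem.List.slice_natCast, List.drop_drop]
          congr 1
          omega
        rw [hans]
        have hkj1 : ((k + iN + jN : Nat) : Int) = ((k + iN + jN + 1 : Nat) : Int) - 1 := by
          push_cast; ring
        rw [hkj1]
        rw [ihf q _ (k + iN + jN + 1) (by omega) (by omega)]
        rw [show List.drop (jN + 1) (List.drop (k + iN) q) = List.drop (k + iN + jN + 1) q
          from by rw [List.drop_drop]; congr 1]
        simp

lemma b2e (questions : String) :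
    solve_alt questions =
      ((PySem.Chars.splitOn questions.toList ['?']).dropLast).flatMap emitSeg := by
  unfold solve_alt
  rw [PySem.List.slice_to_neg_one]
  have hbody : (fun (rtn : List String) (seg : List Char) =>
      let tail := PySem.Chars.slice seg (some (PySem.Chars.rfind seg ['.'] + 1)) none
      let i := PySem.Chars.find tail wChars
      if i ≠ -1 then
        rtn ++ [String.ofList ("Forty-two".toList ++ PySem.Chars.slice tail (some (i + 4)) none ++ ['.'])]
      else rtn) = fun rtn seg => rtn ++ emitSeg seg := by
    funext rtn seg
    unfold emitSeg emitCore
    dsimp only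
    split_ifs <;> simp
  rw [hbody, PySem.List.foldl_append_eq_flatMap]
  simp

-- ===== VERDICT (by name: the statement is the Claim_ definition above) =====
theorem solve_spec : Claim_equal_solve := by
  intro questions _
  unfold Spec_solve solve
  rw [b2e, ← g2b questions.toList.length _ le_rfl]
  have h0 : ((0 : Nat) : Int) - 1 = -1 := by norm_num
  have := a2g (questions.toList.length + 1) questions.toList [] 0 (by omega) (by omega)
  rw [h0] at this
  simpa using this
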